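-- pv_equiv track=rewrite | github.com/smebad/DSA | 193. Convert an Array Into a 2D Array With Conditions/hashmap_sol.py | findMatrix
-- ===== SOURCE A (Python) =====
-- from collections import defaultdict
-- from typing import List
--
-- def findMatrix(nums: List[int]) -> List[List[int]]:
--     count = defaultdict(int)
--     res = []
--
--     for num in nums:
--         row = count[num]
--         if len(res) == row:
--             res.append([])
--         res[row].append(num)
--         count[num] += 1
--
--     return res
-- ===== SOURCE B (Python) =====
-- from typing import List
--
-- def findMatrix(nums: List[int]) -> List[List[int]]:
--     rows = []  # pairs (row, set of its values)
--     for num in nums: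
--         for row, seen in rows:
--             if num not in seen:
--                 row.append(num)
--                 seen.add(num)
--                 break
--         else:
--             rows.append(([num], {num}))
--     return [row for row, _ in rows]
-- ===== Notes on version B (the rewrite author's own statement) =====
-- stated objective: alternative
-- what changed: Replaces A's per-value occurrence-count dictionary (which directly indexes the row to extend) with a greedy scan over (row, seen-set) pairs that appends each number to the first row whose set does not already contain it, creating a new row only when all rows do.
import Mathlib
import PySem

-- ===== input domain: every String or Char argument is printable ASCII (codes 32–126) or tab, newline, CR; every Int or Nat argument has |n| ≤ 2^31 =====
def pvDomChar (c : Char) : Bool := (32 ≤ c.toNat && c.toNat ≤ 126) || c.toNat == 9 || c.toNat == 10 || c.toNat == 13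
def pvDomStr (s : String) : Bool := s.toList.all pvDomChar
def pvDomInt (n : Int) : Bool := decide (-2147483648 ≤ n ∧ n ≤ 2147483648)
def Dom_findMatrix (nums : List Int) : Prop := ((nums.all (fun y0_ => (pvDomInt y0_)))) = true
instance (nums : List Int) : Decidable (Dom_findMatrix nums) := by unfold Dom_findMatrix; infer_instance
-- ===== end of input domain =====

-- B replaces A's occurrence-count dictionary (which indexes the row to extend) by a
-- greedy scan over (row, seen-set) pairs, appending each number to the first row whose
-- set lacks it (alternative decomposition, similar cost).


-- ===== PORT A =====
-- one loop iteration of A: row = count[num]; extend res when needed; res[row].append(num); count[num] += 1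
def findMatrixStep (st : PySem.Dict Int Int × List (List Int)) (num : Int) :
    PySem.Dict Int Int × List (List Int) :=
  let row := st.1.getD num 0
  let res := if (st.2.length : Int) == row then st.2 ++ [[]] else st.2
  (st.1.insert num (row + 1), res.modify row.toNat (· ++ [num]))

def findMatrix (nums : List Int) : List (List Int) :=
  (nums.foldl findMatrixStep (PySem.Dict.empty, [])).2

-- ===== PORT B =====
-- B's inner loop: append num to the first (row, seen-set) pair whose set lacks it, else start a new row
def placePair (num : Int) : List (List Int × PySem.Set Int) → List (List Int × PySem.Set Int)
  | [] => [([num], PySem.Set.add PySem.Set.empty num)]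
  | (r, s) :: rest =>
    if s.contains num then (r, s) :: placePair num rest
    else (r ++ [num], PySem.Set.add s num) :: rest

def findMatrix_alt (nums : List Int) : List (List Int) :=
  (nums.foldl (fun rows num => placePair num rows) []).map (·.1)

-- ===== PRECONDITION & SPEC =====
def Spec_findMatrix (nums : List Int) (out : List (List Int)) : Prop := out = findMatrix_alt nums
instance (nums : List Int) (out : List (List Int)) : Decidable (Spec_findMatrix nums out) := by unfold Spec_findMatrix; infer_instance

-- ===== CLAIM (what is proved, stated in full; the proofs are below) =====
def Claim_equal_findMatrix : Prop := ∀ (nums : List Int), Dom_findMatrix nums → Spec_findMatrix nums (findMatrix nums)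

-- ===== LEMMAS AND PROOFS =====

-- proof-side view of B's step on the row lists alone (sets forgotten)
def placeRow (num : Int) : List (List Int) → List (List Int)
  | [] => [[num]]
  | r :: rs => if num ∈ r then r :: placeRow num rs else (r ++ [num]) :: rs

-- each pair's set holds exactly its row's values; then placePair is placeRow on the rows
lemma placePair_fst (num : Int) : ∀ (ps : List (List Int × PySem.Set Int)),
    (∀ p ∈ ps, ∀ v : Int, v ∈ p.2 ↔ v ∈ p.1) →
    (placePair num ps).map (·.1) = placeRow num (ps.map (·.1)) ∧
    (∀ p ∈ placePair num ps, ∀ v : Int, v ∈ p.2 ↔ v ∈ p.1)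
  | [], _ => by
    refine ⟨by simp [placePair, placeRow], ?_⟩
    intro p hp v
    simp only [placePair, List.mem_singleton] at hp
    subst hp
    simp [PySem.Set.empty]
  | (r, s) :: rest, h => by
    have hs : ∀ v : Int, v ∈ s ↔ v ∈ r := fun v => h (r, s) (by simp) v
    have hrest : ∀ p ∈ rest, ∀ v : Int, v ∈ p.2 ↔ v ∈ p.1 :=
      fun p hp v => h p (List.mem_cons_of_mem _ hp) v
    by_cases hc : num ∈ s
    · have hb : s.contains num = true := by simpa [List.contains_iff_mem] using hc
      have ih := placePair_fst num rest hrest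
      refine ⟨?_, ?_⟩
      · simp [placePair, placeRow, hc, (hs num).mp hc, ih.1]
      · intro p hp v
        simp [placePair, hc] at hp
        rcases hp with hp | hp
        · subst hp; exact hs v
        · exact ih.2 p hp v
    · have hb : s.contains num = false := by simpa [List.contains_iff_mem] using hc
      have hr : num ∉ r := fun hm => hc ((hs num).mpr hm)
      refine ⟨by simp [placePair, placeRow, hc, hr], ?_⟩
      intro p hp v
      simp [placePair, hc] at hp
      rcases hp with hp | hp
      · subst hp
        simp only [List.mem_append, List.mem_singleton]
        rw [hs v]
      · exact hrest p hp v

-- the loop invariant of A: counts are nonnegative and v lies in row i iff i < count[v]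
def InvFM (count : PySem.Dict Int Int) (res : List (List Int)) : Prop :=
  (∀ v : Int, 0 ≤ count.getD v 0) ∧
  (∀ (v : Int) (i : Nat), v ∈ res.getD i [] ↔ (i : Int) < count.getD v 0)

lemma getD_append_single : ∀ (res : List (List Int)) (x : List Int) (i : Nat),
    (res ++ [x]).getD i [] = if i = res.length then x else res.getD i []
  | [], x, i => by cases i <;> simp
  | r :: rs, x, 0 => by simp
  | r :: rs, x, i + 1 => by simpa using getD_append_single rs x i

lemma modify_append_len (num : Int) : ∀ (res : List (List Int)),
    (res ++ [[]]).modify res.length (· ++ [num]) = res ++ [[num]]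
  | [] => by simp [List.modify]
  | r :: rs => by simpa [List.modify] using modify_append_len num rs

lemma getD_modify_list : ∀ (res : List (List Int)) (c j : Nat) (f : List Int → List Int),
    (res.modify c f).getD j [] = if c = j ∧ j < res.length then f (res.getD j []) else res.getD j []
  | [], c, j, f => by simp
  | r :: rs, 0, 0, f => by simp [List.modify]
  | r :: rs, 0, j + 1, f => by simp [List.modify]
  | r :: rs, c + 1, 0, f => by simp [List.modify]
  | r :: rs, c + 1, j + 1, f => by
    simpa [List.modify, Nat.succ_lt_succ_iff] using getD_modify_list rs c j f

lemma count_le_len {count : PySem.Dict Int Int} {res : List (List Int)}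
    (hinv : InvFM count res) (v : Int) : count.getD v 0 ≤ (res.length : Int) := by
  by_contra h
  have := (hinv.2 v res.length).mpr (by omega)
  simp at this

lemma placeRow_eq (num : Int) : ∀ (res : List (List Int)) (k : Nat),
    (∀ j, j < k → num ∈ res.getD j []) → (k < res.length → num ∉ res.getD k []) → k ≤ res.length →
    placeRow num res = if k = res.length then res ++ [[num]] else res.modify k (· ++ [num])
  | [], k, _, _, hle => by
    simp only [List.length_nil, Nat.le_zero] at hle
    simp [hle, placeRow]
  | r :: rs, 0, _, hnot, _ => by
    have : num ∉ r := by simpa using hnot (by simp)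
    simp [placeRow, this, List.modify]
  | r :: rs, k + 1, hmem, hnot, hle => by
    have hr : num ∈ r := by simpa using hmem 0 (Nat.succ_pos k)
    have ih := placeRow_eq num rs k
      (fun j hj => by simpa using hmem (j + 1) (by omega))
      (fun hk => by simpa using hnot (by simp only [List.length_cons]; omega))
      (by simp only [List.length_cons] at hle; omega)
    simp only [placeRow, hr, if_pos, ih]
    by_cases hk : k = rs.length <;> simp [hk, List.modify]

lemma step_eq {count : PySem.Dict Int Int} {res : List (List Int)} (num : Int)
    (hinv : InvFM count res) :
    (findMatrixStep (count, res) num).2 = placeRow num res ∧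
    InvFM (findMatrixStep (count, res) num).1 (findMatrixStep (count, res) num).2 := by
  have hc0 : 0 ≤ count.getD num 0 := hinv.1 num
  have hlen := count_le_len hinv num
  have hcnat : ((count.getD num 0).toNat : Int) = count.getD num 0 := Int.toNat_of_nonneg hc0
  have hmem : ∀ j : Nat, j < (count.getD num 0).toNat → num ∈ res.getD j [] := by
    intro j hj
    exact (hinv.2 num j).mpr (by omega)
  have hres2 : (findMatrixStep (count, res) num).2 = placeRow num res := by
    by_cases h : (res.length : Int) = count.getD num 0
    · have hk : (count.getD num 0).toNat = res.length := by omega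
      rw [placeRow_eq num res _ hmem (by omega) (by omega), if_pos hk]
      have hb : ((res.length : Int) == count.getD num 0) = true := by simpa using h
      simp only [findMatrixStep, hb, if_pos, hk]
      exact modify_append_len num res
    · have hk : (count.getD num 0).toNat < res.length := by omega
      rw [placeRow_eq num res _ hmem
        (fun _ => fun hnum => absurd ((hinv.2 num _).mp hnum) (by omega)) (by omega),
        if_neg (by omega)]
      have hb : ((res.length : Int) == count.getD num 0) = false := by simpa using h
      simp [findMatrixStep, hb]
  refine ⟨hres2, ?_, ?_⟩
  · -- counts stay nonnegative
    intro v
    simp only [findMatrixStep, PySem.Dict.getD_insert]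
    by_cases hv : v = num <;> simp [hv]
    · omega
    · exact hinv.1 v
  · -- membership characterisation for the new state
    intro v i
    rw [show (findMatrixStep (count, res) num).2 = placeRow num res from hres2]
    have h1 : (findMatrixStep (count, res) num).1.getD v 0 =
        if v = num then count.getD num 0 + 1 else count.getD v 0 := by
      simp [findMatrixStep, PySem.Dict.getD_insert]
    rw [h1]
    by_cases h : (res.length : Int) = count.getD num 0
    · have hk : (count.getD num 0).toNat = res.length := by omega
      rw [placeRow_eq num res _ hmem (by omega) (by omega), if_pos hk,
        getD_append_single]
      by_cases hv : v = num
      · subst hv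
        by_cases hi : i = res.length
        · simp [hi]; omega
        · rw [if_neg hi, if_pos rfl, hinv.2 v i]
          omega
      · have hvle := count_le_len hinv v
        by_cases hi : i = res.length
        · simp [hi, hv]; omega
        · simp only [if_neg hi, if_neg hv]
          simpa [List.getD_eq_getElem?_getD] using hinv.2 v i
    · have hk : (count.getD num 0).toNat < res.length := by omega
      have hnotc : num ∉ res.getD (count.getD num 0).toNat [] :=
        fun hnum => absurd ((hinv.2 num _).mp hnum) (by omega)
      rw [placeRow_eq num res _ hmem (fun _ => hnotc) (by omega), if_neg (by omega),
        getD_modify_list]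
      by_cases hv : v = num
      · subst hv
        by_cases hi : (count.getD v 0).toNat = i ∧ i < res.length
        · rw [if_pos hi, if_pos rfl]
          simp only [List.mem_append, List.mem_singleton]
          rw [hinv.2 v i]
          constructor
          · rintro (h1 | h2) <;> omega
          · intro _; exact Or.inr trivial
        · rw [if_neg hi, if_pos rfl, hinv.2 v i]
          constructor
          · intro h1; omega
          · intro h1
            rcases Nat.lt_or_ge i res.length with hlt | hge
            · have : ¬ ((count.getD v 0).toNat = i) := fun hh => hi ⟨hh, hlt⟩
              omega
            · omega
      · by_cases hi : (count.getD num 0).toNat = i ∧ i < res.length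
        · rw [if_pos hi, if_neg hv]
          simp only [List.mem_append, List.mem_singleton, hv, or_false]
          exact hinv.2 v i
        · rw [if_neg hi, if_neg hv]
          exact hinv.2 v i

lemma fold_eq : ∀ (nums : List Int) (count : PySem.Dict Int Int)
    (ps : List (List Int × PySem.Set Int)),
    InvFM count (ps.map (·.1)) → (∀ p ∈ ps, ∀ v : Int, v ∈ p.2 ↔ v ∈ p.1) →
    (nums.foldl findMatrixStep (count, ps.map (·.1))).2 =
      ((nums.foldl (fun rows num => placePair num rows) ps).map (·.1))
  | [], _, _, _, _ => rfl
  | num :: nums, count, ps, hinv, hsets => by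
    obtain ⟨heq, hinv2⟩ := step_eq num hinv
    obtain ⟨hfst, hsets2⟩ := placePair_fst num ps hsets
    simp only [List.foldl_cons]
    have h2 : (findMatrixStep (count, ps.map (·.1)) num).2 = (placePair num ps).map (·.1) :=
      heq.trans hfst.symm
    have hpair : findMatrixStep (count, ps.map (·.1)) num =
        ((findMatrixStep (count, ps.map (·.1)) num).1, (placePair num ps).map (·.1)) := by
      rw [← h2]
    rw [hpair]
    exact fold_eq nums _ _ (by rw [h2] at hinv2; exact_mod_cast hinv2) hsets2

-- ===== VERDICT (by name: the statement is the Claim_ definition above) =====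
theorem findMatrix_spec : Claim_equal_findMatrix := by
  intro nums _
  show findMatrix nums = findMatrix_alt nums
  unfold findMatrix findMatrix_alt
  exact fold_eq nums PySem.Dict.empty []
    ⟨fun v => by simp [PySem.Dict.getD_empty],
     fun v i => by simp [PySem.Dict.getD_empty]⟩
    (by simp)
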